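-- pv_equiv track=rewrite | github.com/vmkmym/Algorithm | 백준/Silver/1309. 동물원/동물원.py | zoo
-- ===== SOURCE A (Python) =====
-- def zoo(n):
--     dp = [[0]*3 for _ in range(n+1)]
--     dp[0][0] = 1
--
--     for i in range(1, n+1):
--         dp[i][0] = sum(dp[i-1]) % 9901 # 사과를 배치하지 않을 때 i-1 이전줄, i 현재줄
--         dp[i][1] = (dp[i-1][0] + dp[i-1][2]) % 9901 # 왼쪽 칸에 사자를 배치할 때
--         dp[i][2] = (dp[i-1][0] + dp[i-1][1]) % 9901 # 오른쪽 칸에 사자를 배치할 때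
--
--     return sum(dp[n]) % 9901
-- ===== SOURCE B (Python) =====
-- def zoo(n):
--     # Matrix exponentiation of the recurrence f(k) = 2*f(k-1) + f(k-2) (mod 9901).
--     if n <= 0:
--         return 1
--
--     def mul(x, y):
--         (a, b), (c, d) = x
--         (e, f), (g, h) = y
--         return (((a * e + b * g) % 9901, (a * f + b * h) % 9901),
--                 ((c * e + d * g) % 9901, (c * f + d * h) % 9901))
--
--     def mpow(m, k):
--         if k == 0:
--             return ((1, 0), (0, 1))
--         h = mpow(m, k // 2)
--         s = mul(h, h)
--         return mul(s, m) if k % 2 == 1 else s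
--
--     p = mpow(((2, 1), (1, 0)), n)
--     return (p[0][0] + p[0][1]) % 9901
-- ===== Notes on version B (the rewrite author's own statement) =====
-- stated objective: faster
-- what changed: Replaced the O(n) row-by-row 3-state DP table with O(log n) binary exponentiation of the 2x2 matrix of the total-count recurrence f(k)=2f(k-1)+f(k-2) mod 9901.
-- outside the precondition, e.g. on zoo(-1): A raises IndexError, B returns 1
import Mathlib
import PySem

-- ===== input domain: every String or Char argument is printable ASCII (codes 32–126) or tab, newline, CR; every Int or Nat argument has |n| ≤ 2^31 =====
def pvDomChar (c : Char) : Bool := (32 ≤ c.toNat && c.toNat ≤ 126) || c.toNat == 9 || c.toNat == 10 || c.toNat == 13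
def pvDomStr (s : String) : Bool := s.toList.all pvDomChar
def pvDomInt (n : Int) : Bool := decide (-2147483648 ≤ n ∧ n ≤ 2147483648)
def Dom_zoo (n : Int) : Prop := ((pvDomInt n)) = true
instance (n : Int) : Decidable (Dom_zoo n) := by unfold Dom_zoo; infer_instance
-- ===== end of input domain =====

-- B replaces A's row-by-row DP loop with binary exponentiation of the 2x2 matrix
-- of the recurrence f(k) = 2 f(k-1) + f(k-2) (mod 9901).

-- ===== PORT A =====
-- loop body: from row dp[i-1] = (a, b, c) compute row dp[i]
def zooStep (dp : Int × Int × Int) : Int × Int × Int :=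
  (PySem.Int.mod (dp.1 + dp.2.1 + dp.2.2) 9901,
   PySem.Int.mod (dp.1 + dp.2.2) 9901,
   PySem.Int.mod (dp.1 + dp.2.1) 9901)

def zoo (n : Int) : Int :=
  if n < 0 then 0  -- Python A raises IndexError here (dp[0][0] on an empty dp); outside Pre_zoo
  else
    -- dp[0] = (1,0,0); for i in range(1, n+1): dp[i] := zooStep dp[i-1]
    let dp := (PySem.List.pyRange 1 (n + 1) 1).foldl (fun prev _ => zooStep prev) (1, 0, 0)
    PySem.Int.mod (dp.1 + dp.2.1 + dp.2.2) 9901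

-- ===== PORT B =====
def mulM (x y : (Int × Int) × (Int × Int)) : (Int × Int) × (Int × Int) :=
  ((PySem.Int.mod (x.1.1 * y.1.1 + x.1.2 * y.2.1) 9901,
    PySem.Int.mod (x.1.1 * y.1.2 + x.1.2 * y.2.2) 9901),
   (PySem.Int.mod (x.2.1 * y.1.1 + x.2.2 * y.2.1) 9901,
    PySem.Int.mod (x.2.1 * y.1.2 + x.2.2 * y.2.2) 9901))

def mpowM (m : (Int × Int) × (Int × Int)) (k : Nat) : (Int × Int) × (Int × Int) :=
  if h : k = 0 then ((1, 0), (0, 1))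
  else
    let hp := mpowM m (k / 2)
    let s := mulM hp hp
    if k % 2 = 1 then mulM s m else s
termination_by k
decreasing_by exact Nat.div_lt_self (Nat.pos_of_ne_zero h) (by norm_num)

def zoo_alt (n : Int) : Int :=
  if n ≤ 0 then 1
  else
    let p := mpowM ((2, 1), (1, 0)) n.toNat
    PySem.Int.mod (p.1.1 + p.1.2) 9901

-- ===== PRECONDITION & SPEC =====
-- Pre_zoo excludes n < 0, where Python A raises IndexError (dp[0][0] on an empty list).
def Pre_zoo (n : Int) : Prop := 0 ≤ n
instance (n : Int) : Decidable (Pre_zoo n) := by unfold Pre_zoo; infer_instance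
def pvWitness_zoo : Int := 5

def Spec_zoo (n : Int) (out : Int) : Prop := out = zoo_alt n
instance (n : Int) (out : Int) : Decidable (Spec_zoo n out) := by unfold Spec_zoo; infer_instance

-- ===== CLAIM (what is proved, stated in full; the proofs are below) =====
def Claim_equal_zoo : Prop := ∀ (n : Int), Dom_zoo n → Pre_zoo n → Spec_zoo n (zoo n)

-- ===== LEMMAS AND PROOFS =====

-- The common specification sequence of both ports, taken in ZMod 9901.
def G : Nat → ZMod 9901
  | 0 => 1
  | 1 => 1
  | (k + 2) => 2 * G (k + 1) + G k

lemma G_succ_succ (k : Nat) : G (k + 2) = 2 * G (k + 1) + G k := rfl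

-- cast a Python mod to ZMod 9901
lemma cast_emod (a : Int) : ((a % 9901 : Int) : ZMod 9901) = (a : ZMod 9901) := by
  have h : ((9901 : ℤ)) = ((9901 : ℕ) : ℤ) := by norm_num
  rw [h, ZMod.intCast_mod]

lemma cast_mod (a : Int) : ((PySem.Int.mod a 9901 : Int) : ZMod 9901) = (a : ZMod 9901) := by
  rw [PySem.Int.mod_eq_emod_of_pos (by norm_num), cast_emod]

lemma int_eq_of_cast_eq {a b : Int} (ha : 0 ≤ a) (ha2 : a < 9901) (hb : 0 ≤ b) (hb2 : b < 9901)
    (h : (a : ZMod 9901) = (b : ZMod 9901)) : a = b := by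
  have hmod : a % ((9901 : ℕ) : ℤ) = b % ((9901 : ℕ) : ℤ) :=
    (ZMod.intCast_eq_intCast_iff a b 9901).mp h
  have h9 : ((9901 : ℕ) : ℤ) = 9901 := by norm_num
  rw [h9, Int.emod_eq_of_lt ha ha2, Int.emod_eq_of_lt hb hb2] at hmod
  exact hmod

-- ---- A side ----

lemma foldl_ignore {α : Type} (f : α → α) (s : α) (l : List Int) :
    l.foldl (fun p _ => f p) s = f^[l.length] s := by
  induction l generalizing s with
  | nil => rfl
  | cons x xs ih => simp [List.foldl_cons, ih, Function.iterate_succ_apply]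

def T (k : Nat) : Int × Int × Int := zooStep^[k] ((1 : Int), (0 : Int), (0 : Int))

lemma A_inv : ∀ k : Nat,
    (((T k).1 : Int) : ZMod 9901) = G k ∧
    (((T k).1 + (T k).2.1 + (T k).2.2 : Int) : ZMod 9901) = G (k + 1) := by
  intro k
  induction k with
  | zero => simp [T, G]
  | succ k ih =>
    obtain ⟨h1, h2⟩ := ih
    have hT : T (k + 1) = zooStep (T k) := by
      simp [T, Function.iterate_succ_apply']
    push_cast at h2
    constructor
    · rw [hT]
      simp only [zooStep]
      rw [cast_mod]
      push_cast
      exact h2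
    · rw [hT]
      simp only [zooStep]
      push_cast [cast_mod]
      rw [G_succ_succ]
      linear_combination 2 * h2 + h1

-- ---- B side ----

def Phi (x : (Int × Int) × (Int × Int)) : Matrix (Fin 2) (Fin 2) (ZMod 9901) :=
  !![(x.1.1 : ZMod 9901), (x.1.2 : ZMod 9901); (x.2.1 : ZMod 9901), (x.2.2 : ZMod 9901)]

def MZ : Matrix (Fin 2) (Fin 2) (ZMod 9901) := !![2, 1; 1, 0]

lemma MZ00 : MZ 0 0 = 2 := by simp [MZ]
lemma MZ01 : MZ 0 1 = 1 := by simp [MZ]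
lemma MZ10 : MZ 1 0 = 1 := by simp [MZ]
lemma MZ11 : MZ 1 1 = 0 := by simp [MZ]

lemma phi_mul (x y : (Int × Int) × (Int × Int)) : Phi (mulM x y) = Phi x * Phi y := by
  ext i j
  fin_cases i <;> fin_cases j <;>
    simp [Phi, mulM, cast_emod, Matrix.mul_apply, Fin.sum_univ_two]

lemma phi_one : Phi ((1, 0), (0, 1)) = 1 := by
  ext i j
  fin_cases i <;> fin_cases j <;> simp [Phi]

lemma phi_mpow (m : (Int × Int) × (Int × Int)) : ∀ k : Nat, Phi (mpowM m k) = (Phi m) ^ k := by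
  intro k
  induction k using Nat.strong_induction_on with
  | _ k ih =>
    by_cases h : k = 0
    · rw [mpowM, dif_pos h, h, pow_zero, phi_one]
    · have hlt : k / 2 < k := Nat.div_lt_self (Nat.pos_of_ne_zero h) (by norm_num)
      have ihh := ih (k / 2) hlt
      rw [mpowM, dif_neg h]
      by_cases hm : k % 2 = 1
      · have key : Phi (mulM (mulM (mpowM m (k / 2)) (mpowM m (k / 2))) m) = (Phi m) ^ k := by
          rw [phi_mul, phi_mul, ihh, ← pow_add, ← pow_succ]
          congr 1
          omega
        simpa [hm] using key
      · have key : Phi (mulM (mpowM m (k / 2)) (mpowM m (k / 2))) = (Phi m) ^ k := by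
          rw [phi_mul, ihh, ← pow_add]
          congr 1
          omega
        simpa [hm] using key

lemma B_rowsum : ∀ k : Nat,
    (MZ ^ k) 0 0 + (MZ ^ k) 0 1 = G (k + 1) ∧
    (MZ ^ k) 1 0 + (MZ ^ k) 1 1 = G k := by
  intro k
  induction k with
  | zero => simp [G]
  | succ k ih =>
    obtain ⟨h1, h2⟩ := ih
    rw [pow_succ']
    constructor
    · rw [G_succ_succ]
      simp only [Matrix.mul_apply, Fin.sum_univ_two, MZ00, MZ01]
      linear_combination (2 : ZMod 9901) * h1 + h2
    · simp only [Matrix.mul_apply, Fin.sum_univ_two, MZ10, MZ11]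
      linear_combination h1

lemma phi_M : Phi ((2, 1), (1, 0)) = MZ := by
  ext i j
  fin_cases i <;> fin_cases j <;> simp [Phi, MZ]

-- ===== VERDICT (by name: the statement is the Claim_ definition above) =====
theorem zoo_spec : Claim_equal_zoo := by
  intro n _ hpre
  unfold Spec_zoo
  by_cases h0 : n ≤ 0
  · have h : n = 0 := le_antisymm h0 hpre
    subst h
    decide
  · have hz : zoo n = PySem.Int.mod ((T n.toNat).1 + (T n.toNat).2.1 + (T n.toNat).2.2) 9901 := by
      simp only [zoo, if_neg (show ¬ n < 0 by omega), foldl_ignore,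
        PySem.List.length_pyRange_one, add_sub_cancel_right, T]
    have ha : zoo_alt n = PySem.Int.mod
        ((mpowM ((2, 1), (1, 0)) n.toNat).1.1 + (mpowM ((2, 1), (1, 0)) n.toNat).1.2) 9901 := by
      simp only [zoo_alt, if_neg h0]
    rw [hz, ha]
    apply int_eq_of_cast_eq (PySem.Int.mod_nonneg _ (by norm_num)) (PySem.Int.mod_lt _ (by norm_num))
      (PySem.Int.mod_nonneg _ (by norm_num)) (PySem.Int.mod_lt _ (by norm_num))
    rw [cast_mod, cast_mod]
    have hA := (A_inv n.toNat).2
    have hB := (B_rowsum n.toNat).1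
    rw [← phi_M, ← phi_mpow] at hB
    have e0 : Phi (mpowM ((2, 1), (1, 0)) n.toNat) 0 0
        = (((mpowM ((2, 1), (1, 0)) n.toNat).1.1 : Int) : ZMod 9901) := by simp [Phi]
    have e1 : Phi (mpowM ((2, 1), (1, 0)) n.toNat) 0 1
        = (((mpowM ((2, 1), (1, 0)) n.toNat).1.2 : Int) : ZMod 9901) := by simp [Phi]
    rw [e0, e1] at hB
    push_cast at hA hB ⊢
    linear_combination hA - hB
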